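-- pv_equiv track=rewrite | github.com/sun-hainan/Python | _worktree_backup/project_euler/problem_109/sol1.py | solution
-- ===== SOURCE A (Python) =====
-- from itertools import combinations_with_replacement
--
-- def solution(limit: int = 100) -> int:
--     """
--     Count the number of distinct ways a player can checkout with a score
--     less than limit.
--     >>> solution(171)
--     42336
--     >>> solution(50)
--     12577
--     """
--     singles: list[int] = [*list(range(1, 21)), 25]
--     doubles: list[int] = [2 * x for x in range(1, 21)] + [50]
--     triples: list[int] = [3 * x for x in range(1, 21)]
--     all_values: list[int] = singles + doubles + triples + [0]
--
--     num_checkouts: int = 0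
--     double: int
--     throw1: int
--     throw2: int
--     checkout_total: int
--
--     for double in doubles:
--     # 遍历循环
--         for throw1, throw2 in combinations_with_replacement(all_values, 2):
--             checkout_total = double + throw1 + throw2
--             if checkout_total < limit:
--                 num_checkouts += 1
--
--     return num_checkouts
-- ===== SOURCE B (Python) =====
-- def _pair_sums(vals: list[int]) -> list[int]:
--     # sums v + w over suffix pairs: vals[i] + vals[j] for i <= j
--     if not vals:
--         return []
--     head = vals[0]
--     return [head + w for w in vals] + _pair_sums(vals[1:])
--
--
-- def _bisect_left(a: list[int], x: int) -> int:
--     # number of elements of sorted list a strictly below x (binary search)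
--     lo, hi = 0, len(a)
--     while lo < hi:
--         mid = (lo + hi) // 2
--         if a[mid] < x:
--             lo = mid + 1
--         else:
--             hi = mid
--     return lo
--
--
-- def solution(limit: int = 100) -> int:
--     """
--     Count the number of distinct ways a player can checkout with a score
--     less than limit.
--     >>> solution(171)
--     42336
--     >>> solution(50)
--     12577
--     """
--     values: list[int] = [m * x for m in range(1, 4) for x in range(1, 21)] + [0, 25, 50]
--     sorted_sums: list[int] = sorted(_pair_sums(values))
--     return sum(
--         _bisect_left(sorted_sums, limit - double)
--         for double in list(range(2, 41, 2)) + [50]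
--     )
-- ===== Notes on version B (the rewrite author's own statement) =====
-- stated objective: faster
-- what changed: B computes the multiset of all two-throw pair sums once via a suffix recursion, sorts it, and sums one binary search (bisect_left, strict <) per double, instead of A's full rescan of all pairs for each double.
import Mathlib
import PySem

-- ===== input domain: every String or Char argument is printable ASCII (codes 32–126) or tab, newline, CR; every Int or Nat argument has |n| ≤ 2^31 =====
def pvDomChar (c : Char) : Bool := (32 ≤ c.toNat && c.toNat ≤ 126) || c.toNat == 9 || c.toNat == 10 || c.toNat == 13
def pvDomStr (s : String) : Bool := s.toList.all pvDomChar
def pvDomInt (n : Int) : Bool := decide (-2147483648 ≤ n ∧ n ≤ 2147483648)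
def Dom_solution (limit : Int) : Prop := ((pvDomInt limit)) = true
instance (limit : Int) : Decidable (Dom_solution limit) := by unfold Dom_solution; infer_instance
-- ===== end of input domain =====

set_option maxRecDepth 4000

-- B builds the sorted multiset of all two-throw pair sums once (suffix recursion over the
-- value list) and sums one binary search per double, instead of A's rescan of every pair
-- for every double (objective: alternative).

-- ===== PORT A =====
-- itertools.combinations_with_replacement(xs, 2) in CPython's order
def cwr2 : List Int → List (Int × Int)
  | [] => []
  | x :: xs => (x :: xs).map (fun y => (x, y)) ++ cwr2 xs

def solution (limit : Int) : Int :=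
  let singles : List Int := PySem.List.pyRange 1 21 1 ++ [25]
  let doubles : List Int := (PySem.List.pyRange 1 21 1).map (fun x => 2 * x) ++ [50]
  let triples : List Int := (PySem.List.pyRange 1 21 1).map (fun x => 3 * x)
  let allValues : List Int := singles ++ doubles ++ triples ++ [0]
  doubles.foldl (fun numCheckouts double =>
    (cwr2 allValues).foldl (fun acc p =>
      let checkoutTotal := double + p.1 + p.2
      if checkoutTotal < limit then acc + 1 else acc) numCheckouts) 0

-- ===== PORT B =====
-- _pair_sums: sums vals[i] + vals[j] over all i ≤ j, by recursion on the suffix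
def pairSums : List Int → List Int
  | [] => []
  | v :: vs => (v :: vs).map (fun w => v + w) ++ pairSums vs

def solution_alt (limit : Int) : Int :=
  let values : List Int :=
    PySem.List.pyRange 1 21 1 ++ [25] ++ PySem.List.pyRange 2 41 2 ++ [50]
      ++ PySem.List.pyRange 3 61 3 ++ [0]
  let sortedSums : List Int := PySem.List.sorted (pairSums values) (fun s => s)
  ((PySem.List.pyRange 2 41 2 ++ [50]).map
      (fun double => (PySem.List.bisectLeft sortedSums (limit - double) : Int))).sum

-- ===== PRECONDITION & SPEC =====
def Spec_solution (limit : Int) (out : Int) : Prop := out = solution_alt limit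
instance (limit : Int) (out : Int) : Decidable (Spec_solution limit out) := by unfold Spec_solution; infer_instance

-- ===== CLAIM =====
def Claim_equal_solution : Prop := ∀ (limit : Int), Dom_solution limit → Spec_solution limit (solution limit)

-- ===== LEMMAS AND PROOFS =====

-- B's values list is, element for element, A's all_values list
lemma values_eq :
    (PySem.List.pyRange 1 21 1 ++ [25] ++ PySem.List.pyRange 2 41 2 ++ [50]
      ++ PySem.List.pyRange 3 61 3 ++ [0])
    = ((PySem.List.pyRange 1 21 1 ++ [25])
        ++ ((PySem.List.pyRange 1 21 1).map (fun x => 2 * x) ++ [50])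
        ++ (PySem.List.pyRange 1 21 1).map (fun x => 3 * x) ++ [0]) := by
  rw [PySem.List.pyRange_of_pos 2 41 (by norm_num),
    PySem.List.pyRange_of_pos 3 61 (by norm_num), PySem.List.pyRange_one]
  decide

-- B's double list is A's double list
lemma doubles_eq :
    PySem.List.pyRange 2 41 2 ++ [50]
      = (PySem.List.pyRange 1 21 1).map (fun x => 2 * x) ++ [50] := by
  rw [PySem.List.pyRange_of_pos 2 41 (by norm_num), PySem.List.pyRange_one]
  decide

-- pairSums is the pair sums of cwr2 in the same order
lemma pairSums_eq_cwr2 (vs : List Int) :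
    pairSums vs = (cwr2 vs).map (fun p => p.1 + p.2) := by
  induction vs with
  | nil => rfl
  | cons v vs ih =>
      simp [pairSums, cwr2, ih, List.map_map, Function.comp]

-- on a sorted list, bisect_left returns the number of elements strictly below x
lemma bisect_eq_countP (xs : List Int) (x : Int) (h : xs.Pairwise (· ≤ ·)) :
    PySem.List.bisectLeft xs x = xs.countP (fun s => decide (s < x)) := by
  obtain ⟨hk, hlt, hge⟩ := PySem.List.bisectLeft_spec xs x h
  set k := PySem.List.bisectLeft xs x with hkdef
  have htake : (xs.take k).countP (fun s => decide (s < x)) = k := by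
    rw [List.countP_eq_length.mpr, List.length_take, Nat.min_eq_left hk]
    intro a ha
    obtain ⟨j, hj, rfl⟩ := List.mem_iff_getElem.mp ha
    have hjk : j < k := lt_of_lt_of_le hj (by simp [List.length_take])
    have hjlen : j < xs.length := lt_of_lt_of_le hjk hk
    simpa [List.getElem_take] using hlt j hjlen hjk
  have hdrop : (xs.drop k).countP (fun s => decide (s < x)) = 0 := by
    rw [List.countP_eq_zero]
    intro a ha
    obtain ⟨j, hj, rfl⟩ := List.mem_iff_getElem.mp ha
    have hjlen : k + j < xs.length := by
      have := List.length_drop (l := xs) (i := k); omega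
    have := hge (k + j) hjlen (Nat.le_add_right _ _)
    simp [List.getElem_drop]
    omega
  conv_rhs => rw [← List.take_append_drop k xs]
  rw [List.countP_append, htake, hdrop]
  omega

-- per double, A's rescan count equals B's binary-search count
lemma per_double (av : List Int) (limit d : Int) :
    ((cwr2 av).countP (fun p => decide (d + p.1 + p.2 < limit)) : Int)
      = (PySem.List.bisectLeft
          (PySem.List.sorted ((cwr2 av).map (fun p => p.1 + p.2)) (fun s => s))
          (limit - d) : Int) := by
  rw [bisect_eq_countP _ _ (PySem.List.sorted_pairwise _ _)]
  rw [List.Perm.countP_eq _ (PySem.List.sorted_perm _ _ _)]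
  rw [List.countP_map]
  congr 1
  apply List.countP_congr
  intro p _
  simp only [Function.comp_apply, decide_eq_true_eq]
  omega

-- an additive fold over a list is the sum of the mapped list
lemma foldl_add_eq_sum_map (l : List Int) (f : Int → Int) (a : Int) :
    l.foldl (fun acc d => acc + f d) a = a + (l.map f).sum := by
  induction l generalizing a with
  | nil => simp
  | cons x xs ih => simp [List.foldl_cons, ih, add_assoc]

theorem solution_spec : Claim_equal_solution := by
  intro limit _
  unfold Spec_solution solution solution_alt
  simp only [PySem.List.foldl_ite_add_one]
  rw [values_eq, doubles_eq, foldl_add_eq_sum_map, pairSums_eq_cwr2, zero_add]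
  exact congrArg List.sum (List.map_congr_left fun d _ => per_double _ limit d)
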